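-- pv_equiv track=rewrite | github.com/pytorch/pytorch | tools/autograd/gen_variable_factories.py | collapseFormalsTO
-- ===== SOURCE A (Python) =====
-- def collapseFormalsTO(formals):
--     if ('ScalarType' in f for f in formals) and \
--        ('Layout' in f for f in formals) and \
--        ('Device' in f for f in formals) and \
--        ('bool' in f for f in formals):
--
--         index = -1
--
--         if index == -1:
--             index = formals.index('c10::optional<at::ScalarType> dtype = c10::nullopt') if 'c10::optional<at::ScalarType> dtype = c10::nullopt' in formals else -1
--             if index != -1:
--                 formals.insert(index + 4, 'const at::TensorOptions & options = {}')
--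
--         if index == -1:
--             index = formals.index('c10::optional<at::ScalarType> dtype = at::kLong') if 'c10::optional<at::ScalarType> dtype = at::kLong' in formals else -1
--             if index != -1:
--                 formals.insert(index + 4, 'const at::TensorOptions & options = at::kLong')
--
--         if index == -1:
--             index = formals.index('at::ScalarType dtype') if 'at::ScalarType dtype' in formals else -1
--             if index != -1:
--                 formals.insert(index + 4, 'const at::TensorOptions & options')
--
--         if index != -1:
--             formals.pop(index + 3)
--             formals.pop(index + 2)
--             formals.pop(index + 1)
--             formals.pop(index)
--     return formals
-- ===== SOURCE B (Python) =====
-- _RULES = [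
--     ('c10::optional<at::ScalarType> dtype = c10::nullopt',
--      'const at::TensorOptions & options = {}'),
--     ('c10::optional<at::ScalarType> dtype = at::kLong',
--      'const at::TensorOptions & options = at::kLong'),
--     ('at::ScalarType dtype',
--      'const at::TensorOptions & options'),
-- ]
--
--
-- def collapseFormalsTO(formals):
--     for target, repl in _RULES:
--         if target in formals:
--             i = formals.index(target)
--             return formals[:i] + [repl] + formals[i + 4:]
--     return formals
-- ===== Notes on version B (the rewrite author's own statement) =====
-- stated objective: simpler
-- what changed: Replaces the always-true generator guard, the -1 sentinel chain of three copy-pasted if-blocks and the in-place insert-then-four-pops mutation with a (target, replacement) rule table scanned in priority order, rebuilding the result by list slicing instead of mutation.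
-- intended difference: When the first matching dtype formal sits exactly three slots before the end, A's insert at index+4 clamps to an append and the four pops then remove the freshly inserted options string too, so A silently drops it and returns formals[:index]; B returns formals[:index] plus the replacement, which is the intended collapse. — e.g. on collapseFormalsTO(["at::ScalarType dtype", "at::Layout layout", "at::Device device"]): A returns [], B returns ["const at::TensorOptions & options"]
import Mathlib
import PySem

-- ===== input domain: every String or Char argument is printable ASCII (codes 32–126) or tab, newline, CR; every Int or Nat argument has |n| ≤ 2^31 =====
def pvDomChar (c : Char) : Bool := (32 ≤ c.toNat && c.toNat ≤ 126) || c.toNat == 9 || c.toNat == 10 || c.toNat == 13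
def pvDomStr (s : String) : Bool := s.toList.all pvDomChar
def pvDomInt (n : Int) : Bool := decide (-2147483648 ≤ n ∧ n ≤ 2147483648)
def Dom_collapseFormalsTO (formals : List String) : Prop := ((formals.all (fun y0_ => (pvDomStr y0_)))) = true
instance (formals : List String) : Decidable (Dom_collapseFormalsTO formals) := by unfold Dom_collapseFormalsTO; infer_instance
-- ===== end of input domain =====

-- B rewrites A's sentinel-chain + in-place insert/pop mutation as a rule table scanned in
-- priority order with slicing (objective: simpler). Equivalence is about the RETURN value only:
-- A mutates its argument in place, B builds a fresh list.

-- the three target formals and their replacements (string literals shared by both ports)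
def pvT1 : String := "c10::optional<at::ScalarType> dtype = c10::nullopt"
def pvR1 : String := "const at::TensorOptions & options = {}"
def pvT2 : String := "c10::optional<at::ScalarType> dtype = at::kLong"
def pvR2 : String := "const at::TensorOptions & options = at::kLong"
def pvT3 : String := "at::ScalarType dtype"
def pvR3 : String := "const at::TensorOptions & options"

-- ===== PORT A =====
-- the four 'formals.pop(…)' lines; 'none' is Python's IndexError (excluded by Pre_)
def pvPopFour (fs : List String) (index : Int) : List String :=
  match PySem.List.pop? fs (index + 3) with
  | none => fs
  | some (_, fs) =>
    match PySem.List.pop? fs (index + 2) with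
    | none => fs
    | some (_, fs) =>
      match PySem.List.pop? fs (index + 1) with
      | none => fs
      | some (_, fs) =>
        match PySem.List.pop? fs index with
        | none => fs
        | some (_, fs) => fs

def collapseFormalsTO (formals : List String) : List String :=
  -- Python's outer 'if' tests four generator objects, which are always truthy: the body always runs
  let index : Int := -1
  let (index, formals) :=
    if index == -1 then
      let index : Int := if pvT1 ∈ formals then ((PySem.List.index? formals pvT1).getD 0 : Nat) else -1
      if index != -1 then (index, PySem.List.insert formals (index + 4) pvR1) else (index, formals)
    else (index, formals)
  let (index, formals) :=
    if index == -1 then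
      let index : Int := if pvT2 ∈ formals then ((PySem.List.index? formals pvT2).getD 0 : Nat) else -1
      if index != -1 then (index, PySem.List.insert formals (index + 4) pvR2) else (index, formals)
    else (index, formals)
  let (index, formals) :=
    if index == -1 then
      let index : Int := if pvT3 ∈ formals then ((PySem.List.index? formals pvT3).getD 0 : Nat) else -1
      if index != -1 then (index, PySem.List.insert formals (index + 4) pvR3) else (index, formals)
    else (index, formals)
  if index != -1 then pvPopFour formals index else formals

-- ===== PORT B =====
def pvRules : List (String × String) := [(pvT1, pvR1), (pvT2, pvR2), (pvT3, pvR3)]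

-- 'for target, repl in _RULES: …' with early return
def pvScanRules : List (String × String) → List String → List String
  | [], formals => formals
  | (target, repl) :: rest, formals =>
    if target ∈ formals then
      let i : Int := ((PySem.List.index? formals target).getD 0 : Nat)
      PySem.List.slice formals none (some i) ++ [repl] ++ PySem.List.slice formals (some (i + 4)) none
    else pvScanRules rest formals

def collapseFormalsTO_alt (formals : List String) : List String :=
  pvScanRules pvRules formals

-- ===== PRECONDITION & SPEC =====
-- Pre_ excludes exactly the inputs where A raises IndexError: the first matching target sits in
-- one of the last two positions, so one of the pops is out of range.
def Pre_collapseFormalsTO (formals : List String) : Prop :=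
  (pvT1 ∈ formals → (PySem.List.index? formals pvT1).getD 0 + 3 ≤ formals.length) ∧
  (pvT1 ∉ formals → pvT2 ∈ formals → (PySem.List.index? formals pvT2).getD 0 + 3 ≤ formals.length) ∧
  (pvT1 ∉ formals → pvT2 ∉ formals → pvT3 ∈ formals → (PySem.List.index? formals pvT3).getD 0 + 3 ≤ formals.length)
instance (formals : List String) : Decidable (Pre_collapseFormalsTO formals) := by unfold Pre_collapseFormalsTO; infer_instance

def pvWitness_collapseFormalsTO : List String :=
  ["int x", "at::ScalarType dtype", "at::Layout layout", "at::Device device", "bool pin_memory"]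

-- When the first matching target sits exactly three slots before the end, A's insert at index+4
-- clamps to an append and the four pops then also remove the freshly inserted options string, so A
-- silently drops it and returns formals[:index]; B returns formals[:index] ++ [replacement], the
-- intended collapse.
def D_collapseFormalsTO (formals : List String) : Prop :=
  (pvT1 ∈ formals ∧ (PySem.List.index? formals pvT1).getD 0 + 3 = formals.length) ∨
  (pvT1 ∉ formals ∧ pvT2 ∈ formals ∧ (PySem.List.index? formals pvT2).getD 0 + 3 = formals.length) ∨
  (pvT1 ∉ formals ∧ pvT2 ∉ formals ∧ pvT3 ∈ formals ∧ (PySem.List.index? formals pvT3).getD 0 + 3 = formals.length)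
instance (formals : List String) : Decidable (D_collapseFormalsTO formals) := by unfold D_collapseFormalsTO; infer_instance

def Spec_collapseFormalsTO (formals : List String) (out : List String) : Prop :=
  ¬ D_collapseFormalsTO formals → out = collapseFormalsTO_alt formals
instance (formals : List String) (out : List String) : Decidable (Spec_collapseFormalsTO formals out) := by unfold Spec_collapseFormalsTO; infer_instance

def pvDiffWitness_collapseFormalsTO : List String := ["at::ScalarType dtype", "at::Layout layout", "at::Device device"]
def pvDiffWitnessOut_collapseFormalsTO : (List String) × (List String) :=
  ([], ["const at::TensorOptions & options"])

-- ===== CLAIM (what is proved, stated in full; the proofs are below) =====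
def Claim_unchanged_collapseFormalsTO : Prop := ∀ (formals : List String), Dom_collapseFormalsTO formals → Pre_collapseFormalsTO formals → Spec_collapseFormalsTO formals (collapseFormalsTO formals)
def Claim_changed_collapseFormalsTO : Prop := Dom_collapseFormalsTO (pvDiffWitness_collapseFormalsTO) ∧ Pre_collapseFormalsTO (pvDiffWitness_collapseFormalsTO) ∧ D_collapseFormalsTO (pvDiffWitness_collapseFormalsTO) ∧ collapseFormalsTO (pvDiffWitness_collapseFormalsTO) = pvDiffWitnessOut_collapseFormalsTO.1 ∧ collapseFormalsTO_alt (pvDiffWitness_collapseFormalsTO) = pvDiffWitnessOut_collapseFormalsTO.2 ∧ pvDiffWitnessOut_collapseFormalsTO.1 ≠ pvDiffWitnessOut_collapseFormalsTO.2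
def Claim_exact_collapseFormalsTO : Prop := ∀ (formals : List String), Dom_collapseFormalsTO formals → Pre_collapseFormalsTO formals → D_collapseFormalsTO formals → collapseFormalsTO formals ≠ collapseFormalsTO_alt formals


-- ===== LEMMAS AND PROOFS =====
theorem pvPopFour_spec (pre : List String) (a b c d : String) (rest : List String) :
    pvPopFour (pre ++ a :: b :: c :: d :: rest) ((pre.length : Nat) : Int) = pre ++ rest := by
  have h3 : ((pre.length : Int) + 3) = ((pre.length + 3 : Nat) : Int) := by push_cast; ring
  have h2 : ((pre.length : Int) + 2) = ((pre.length + 2 : Nat) : Int) := by push_cast; ring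
  have h1 : ((pre.length : Int) + 1) = ((pre.length + 1 : Nat) : Int) := by push_cast; ring
  unfold pvPopFour
  rw [h3, PySem.List.pop?_natCast _ _ (by simp)]
  dsimp only
  rw [h2, PySem.List.pop?_natCast _ _ (by simp [List.length_eraseIdx])]
  dsimp only
  rw [h1, PySem.List.pop?_natCast _ _ (by simp [List.length_eraseIdx])]
  dsimp only
  rw [PySem.List.pop?_natCast _ _ (by simp [List.length_eraseIdx])]
  dsimp only
  have key : ∀ (p : List String),
      ((((p ++ a :: b :: c :: d :: rest).eraseIdx (p.length + 3)).eraseIdx (p.length + 2)).eraseIdx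
        (p.length + 1)).eraseIdx p.length = p ++ rest := by
    intro p
    induction p with
    | nil => simp [List.eraseIdx]
    | cons x p ih => simpa [List.eraseIdx_cons_succ, Nat.add_right_comm] using ih
  exact key pre

-- the matched branch of port A: insert at index+4 then the four pops, on a decomposed input
theorem pv_computeA (pre rest : List String) (t s1 s2 s3 r : String) :
    pvPopFour (PySem.List.insert (pre ++ t :: s1 :: s2 :: s3 :: rest) ((pre.length : Int) + 4) r)
      ((pre.length : Nat) : Int) = pre ++ r :: rest := by
  have h4 : ((pre.length : Int) + 4) = ((pre.length + 4 : Nat) : Int) := by push_cast; ring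
  rw [h4, PySem.List.insert_natCast _ _ _ (by simp)]
  have hsplit : pre ++ t :: s1 :: s2 :: s3 :: rest = (pre ++ [t, s1, s2, s3]) ++ rest := by simp
  have hL : (pre ++ [t, s1, s2, s3]).length = pre.length + 4 := by simp
  rw [hsplit, List.take_left' hL, List.drop_left' hL]
  have : pre ++ [t, s1, s2, s3] ++ r :: rest = pre ++ t :: s1 :: s2 :: s3 :: r :: rest := by simp
  rw [this]
  exact pvPopFour_spec pre t s1 s2 s3 (r :: rest)

-- the matched branch of port B: the two slices, on a decomposed input
theorem pv_computeB (pre rest : List String) (t s1 s2 s3 r : String) :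
    PySem.List.slice (pre ++ t :: s1 :: s2 :: s3 :: rest) none (some ((pre.length : Nat) : Int)) ++ [r] ++
      PySem.List.slice (pre ++ t :: s1 :: s2 :: s3 :: rest) (some (((pre.length : Nat) : Int) + 4)) none =
      pre ++ r :: rest := by
  have h4 : ((pre.length : Int) + 4) = ((pre.length + 4 : Nat) : Int) := by push_cast; ring
  rw [h4, PySem.List.slice_to_natCast, PySem.List.slice_from_natCast]
  have hsplit : pre ++ t :: s1 :: s2 :: s3 :: rest = (pre ++ [t, s1, s2, s3]) ++ rest := by simp
  have hL : (pre ++ [t, s1, s2, s3]).length = pre.length + 4 := by simp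
  rw [List.take_append_of_le_length (by simp), hsplit, List.drop_left' hL]
  simp

theorem collapseFormalsTO_spec : Claim_unchanged_collapseFormalsTO := by
  intro formals _hDom hPre hD
  unfold Pre_collapseFormalsTO at hPre
  unfold D_collapseFormalsTO at hD
  push Not at hD
  by_cases m1 : pvT1 ∈ formals
  · obtain ⟨k, hk⟩ := Option.isSome_iff_exists.mp ((PySem.List.index?_isSome_iff _ _).mpr m1)
    obtain ⟨pre, suf, hfs, hklen, hpre⟩ := (PySem.List.index?_eq_some_iff _ _ _).mp hk
    have hk' : List.idxOf? pvT1 formals = some k := by rw [← PySem.List.index?_eq_idxOf?]; exact hk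
    have hle : k + 3 ≤ formals.length := by simpa [hk'] using hPre.1 m1
    have hne3 : k + 3 ≠ formals.length := by simpa [hk'] using (hD.1 m1)
    have hsuf : 3 ≤ suf.length := by subst hfs; simp at hle hne3; omega
    obtain ⟨s1, s2, s3, rest, rfl⟩ : ∃ s1 s2 s3 rest, suf = s1 :: s2 :: s3 :: rest := by
      match suf, hsuf with
      | s1 :: s2 :: s3 :: rest, _ => exact ⟨s1, s2, s3, rest, rfl⟩
    subst hfs; subst hklen
    have hA : collapseFormalsTO (pre ++ pvT1 :: s1 :: s2 :: s3 :: rest) = pre ++ pvR1 :: rest := by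
      rw [show collapseFormalsTO (pre ++ pvT1 :: s1 :: s2 :: s3 :: rest) =
          pvPopFour (PySem.List.insert (pre ++ pvT1 :: s1 :: s2 :: s3 :: rest)
            (((pre.length : Nat) : Int) + 4) pvR1) ((pre.length : Nat) : Int) by
        simp [collapseFormalsTO, m1, hk']]
      exact pv_computeA pre rest pvT1 s1 s2 s3 pvR1
    have hB : collapseFormalsTO_alt (pre ++ pvT1 :: s1 :: s2 :: s3 :: rest) = pre ++ pvR1 :: rest := by
      rw [show collapseFormalsTO_alt (pre ++ pvT1 :: s1 :: s2 :: s3 :: rest) =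
          PySem.List.slice (pre ++ pvT1 :: s1 :: s2 :: s3 :: rest) none (some ((pre.length : Nat) : Int)) ++ [pvR1] ++
            PySem.List.slice (pre ++ pvT1 :: s1 :: s2 :: s3 :: rest) (some (((pre.length : Nat) : Int) + 4)) none by
        simp [collapseFormalsTO_alt, pvScanRules, pvRules, m1, hk']]
      exact pv_computeB pre rest pvT1 s1 s2 s3 pvR1
    rw [hA, hB]
  · by_cases m2 : pvT2 ∈ formals
    · obtain ⟨k, hk⟩ := Option.isSome_iff_exists.mp ((PySem.List.index?_isSome_iff _ _).mpr m2)
      obtain ⟨pre, suf, hfs, hklen, hpre⟩ := (PySem.List.index?_eq_some_iff _ _ _).mp hk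
      have hk' : List.idxOf? pvT2 formals = some k := by rw [← PySem.List.index?_eq_idxOf?]; exact hk
      have hle : k + 3 ≤ formals.length := by simpa [hk'] using hPre.2.1 m1 m2
      have hne3 : k + 3 ≠ formals.length := by simpa [hk'] using (hD.2.1 m1 m2)
      have hsuf : 3 ≤ suf.length := by subst hfs; simp at hle hne3; omega
      obtain ⟨s1, s2, s3, rest, rfl⟩ : ∃ s1 s2 s3 rest, suf = s1 :: s2 :: s3 :: rest := by
        match suf, hsuf with
        | s1 :: s2 :: s3 :: rest, _ => exact ⟨s1, s2, s3, rest, rfl⟩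
      subst hfs; subst hklen
      have hA : collapseFormalsTO (pre ++ pvT2 :: s1 :: s2 :: s3 :: rest) = pre ++ pvR2 :: rest := by
        rw [show collapseFormalsTO (pre ++ pvT2 :: s1 :: s2 :: s3 :: rest) =
            pvPopFour (PySem.List.insert (pre ++ pvT2 :: s1 :: s2 :: s3 :: rest)
              (((pre.length : Nat) : Int) + 4) pvR2) ((pre.length : Nat) : Int) by
          simp [collapseFormalsTO, m1, m2, hk']]
        exact pv_computeA pre rest pvT2 s1 s2 s3 pvR2
      have hB : collapseFormalsTO_alt (pre ++ pvT2 :: s1 :: s2 :: s3 :: rest) = pre ++ pvR2 :: rest := by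
        rw [show collapseFormalsTO_alt (pre ++ pvT2 :: s1 :: s2 :: s3 :: rest) =
            PySem.List.slice (pre ++ pvT2 :: s1 :: s2 :: s3 :: rest) none (some ((pre.length : Nat) : Int)) ++ [pvR2] ++
              PySem.List.slice (pre ++ pvT2 :: s1 :: s2 :: s3 :: rest) (some (((pre.length : Nat) : Int) + 4)) none by
          simp [collapseFormalsTO_alt, pvScanRules, pvRules, m1, m2, hk']]
        exact pv_computeB pre rest pvT2 s1 s2 s3 pvR2
      rw [hA, hB]
    · by_cases m3 : pvT3 ∈ formals
      · obtain ⟨k, hk⟩ := Option.isSome_iff_exists.mp ((PySem.List.index?_isSome_iff _ _).mpr m3)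
        obtain ⟨pre, suf, hfs, hklen, hpre⟩ := (PySem.List.index?_eq_some_iff _ _ _).mp hk
        have hk' : List.idxOf? pvT3 formals = some k := by rw [← PySem.List.index?_eq_idxOf?]; exact hk
        have hle : k + 3 ≤ formals.length := by simpa [hk'] using hPre.2.2 m1 m2 m3
        have hne3 : k + 3 ≠ formals.length := by simpa [hk'] using (hD.2.2 m1 m2 m3)
        have hsuf : 3 ≤ suf.length := by subst hfs; simp at hle hne3; omega
        obtain ⟨s1, s2, s3, rest, rfl⟩ : ∃ s1 s2 s3 rest, suf = s1 :: s2 :: s3 :: rest := by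
          match suf, hsuf with
          | s1 :: s2 :: s3 :: rest, _ => exact ⟨s1, s2, s3, rest, rfl⟩
        subst hfs; subst hklen
        have hA : collapseFormalsTO (pre ++ pvT3 :: s1 :: s2 :: s3 :: rest) = pre ++ pvR3 :: rest := by
          rw [show collapseFormalsTO (pre ++ pvT3 :: s1 :: s2 :: s3 :: rest) =
              pvPopFour (PySem.List.insert (pre ++ pvT3 :: s1 :: s2 :: s3 :: rest)
                (((pre.length : Nat) : Int) + 4) pvR3) ((pre.length : Nat) : Int) by
            simp [collapseFormalsTO, m1, m2, m3, hk']]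
          exact pv_computeA pre rest pvT3 s1 s2 s3 pvR3
        have hB : collapseFormalsTO_alt (pre ++ pvT3 :: s1 :: s2 :: s3 :: rest) = pre ++ pvR3 :: rest := by
          rw [show collapseFormalsTO_alt (pre ++ pvT3 :: s1 :: s2 :: s3 :: rest) =
              PySem.List.slice (pre ++ pvT3 :: s1 :: s2 :: s3 :: rest) none (some ((pre.length : Nat) : Int)) ++ [pvR3] ++
                PySem.List.slice (pre ++ pvT3 :: s1 :: s2 :: s3 :: rest) (some (((pre.length : Nat) : Int) + 4)) none by
            simp [collapseFormalsTO_alt, pvScanRules, pvRules, m1, m2, m3, hk']]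
          exact pv_computeB pre rest pvT3 s1 s2 s3 pvR3
        rw [hA, hB]
      · simp [collapseFormalsTO, collapseFormalsTO_alt, pvScanRules, pvRules, m1, m2, m3]

-- in the D_ region the insert clamps to an append and the pops eat the replacement
theorem pv_insert_clamp (pre : List String) (t s1 s2 r : String) :
    PySem.List.insert (pre ++ [t, s1, s2]) ((pre.length : Int) + 4) r = pre ++ [t, s1, s2, r] := by
  simp only [PySem.List.insert, PySem.List.sliceIndices]
  norm_num
  rw [if_neg (by omega : ¬((pre.length : Int) + 4 < 0))]
  have ht : ((pre.length : Int) + 3).toNat = pre.length + 3 := by omega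
  rw [ht, List.take_of_length_le (by simp), List.drop_eq_nil_of_le (by simp)]
  simp

theorem pv_computeA_clamp (pre : List String) (t s1 s2 r : String) :
    pvPopFour (PySem.List.insert (pre ++ [t, s1, s2]) (((pre.length : Nat) : Int) + 4) r)
      ((pre.length : Nat) : Int) = pre := by
  rw [pv_insert_clamp]
  have h := pvPopFour_spec pre t s1 s2 r []
  simpa using h

theorem pv_computeB_clamp (pre : List String) (t s1 s2 r : String) :
    PySem.List.slice (pre ++ [t, s1, s2]) none (some ((pre.length : Nat) : Int)) ++ [r] ++
      PySem.List.slice (pre ++ [t, s1, s2]) (some (((pre.length : Nat) : Int) + 4)) none = pre ++ [r] := by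
  have h4 : ((pre.length : Int) + 4) = ((pre.length + 4 : Nat) : Int) := by push_cast; ring
  rw [h4, PySem.List.slice_to_natCast, PySem.List.slice_from_natCast,
    List.take_append_of_le_length (by simp), List.drop_eq_nil_of_le (by simp)]
  simp

theorem collapseFormalsTO_tight : Claim_exact_collapseFormalsTO := by
  intro formals _hDom _hPre hD
  unfold D_collapseFormalsTO at hD
  rcases hD with ⟨m1, h⟩ | ⟨m1, m2, h⟩ | ⟨m1, m2, m3, h⟩
  · obtain ⟨k, hk⟩ := Option.isSome_iff_exists.mp ((PySem.List.index?_isSome_iff _ _).mpr m1)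
    obtain ⟨pre, suf, hfs, hklen, hpre⟩ := (PySem.List.index?_eq_some_iff _ _ _).mp hk
    have hk' : List.idxOf? pvT1 formals = some k := by rw [← PySem.List.index?_eq_idxOf?]; exact hk
    rw [hk] at h
    have hsuf : suf.length = 2 := by subst hfs; simp at h; omega
    obtain ⟨s1, s2, rfl⟩ : ∃ s1 s2, suf = [s1, s2] := by
      match suf, hsuf with
      | [s1, s2], _ => exact ⟨s1, s2, rfl⟩
    subst hfs; subst hklen
    have hshape : pre ++ pvT1 :: s1 :: s2 :: [] = pre ++ [pvT1, s1, s2] := by simp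
    have hA : collapseFormalsTO (pre ++ [pvT1, s1, s2]) = pre := by
      rw [show collapseFormalsTO (pre ++ [pvT1, s1, s2]) =
          pvPopFour (PySem.List.insert (pre ++ [pvT1, s1, s2])
            (((pre.length : Nat) : Int) + 4) pvR1) ((pre.length : Nat) : Int) by
        simp [collapseFormalsTO, m1, hk']]
      exact pv_computeA_clamp pre pvT1 s1 s2 pvR1
    have hB : collapseFormalsTO_alt (pre ++ [pvT1, s1, s2]) = pre ++ [pvR1] := by
      rw [show collapseFormalsTO_alt (pre ++ [pvT1, s1, s2]) =
          PySem.List.slice (pre ++ [pvT1, s1, s2]) none (some ((pre.length : Nat) : Int)) ++ [pvR1] ++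
            PySem.List.slice (pre ++ [pvT1, s1, s2]) (some (((pre.length : Nat) : Int) + 4)) none by
        simp [collapseFormalsTO_alt, pvScanRules, pvRules, m1, hk']]
      exact pv_computeB_clamp pre pvT1 s1 s2 pvR1
    rw [hA, hB]
    intro hcontra
    have := congrArg List.length hcontra
    simp at this
  · obtain ⟨k, hk⟩ := Option.isSome_iff_exists.mp ((PySem.List.index?_isSome_iff _ _).mpr m2)
    obtain ⟨pre, suf, hfs, hklen, hpre⟩ := (PySem.List.index?_eq_some_iff _ _ _).mp hk
    have hk' : List.idxOf? pvT2 formals = some k := by rw [← PySem.List.index?_eq_idxOf?]; exact hk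
    rw [hk] at h
    have hsuf : suf.length = 2 := by subst hfs; simp at h; omega
    obtain ⟨s1, s2, rfl⟩ : ∃ s1 s2, suf = [s1, s2] := by
      match suf, hsuf with
      | [s1, s2], _ => exact ⟨s1, s2, rfl⟩
    subst hfs; subst hklen
    have hA : collapseFormalsTO (pre ++ [pvT2, s1, s2]) = pre := by
      rw [show collapseFormalsTO (pre ++ [pvT2, s1, s2]) =
          pvPopFour (PySem.List.insert (pre ++ [pvT2, s1, s2])
            (((pre.length : Nat) : Int) + 4) pvR2) ((pre.length : Nat) : Int) by
        simp [collapseFormalsTO, m1, m2, hk']]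
      exact pv_computeA_clamp pre pvT2 s1 s2 pvR2
    have hB : collapseFormalsTO_alt (pre ++ [pvT2, s1, s2]) = pre ++ [pvR2] := by
      rw [show collapseFormalsTO_alt (pre ++ [pvT2, s1, s2]) =
          PySem.List.slice (pre ++ [pvT2, s1, s2]) none (some ((pre.length : Nat) : Int)) ++ [pvR2] ++
            PySem.List.slice (pre ++ [pvT2, s1, s2]) (some (((pre.length : Nat) : Int) + 4)) none by
        simp [collapseFormalsTO_alt, pvScanRules, pvRules, m1, m2, hk']]
      exact pv_computeB_clamp pre pvT2 s1 s2 pvR2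
    rw [hA, hB]
    intro hcontra
    have := congrArg List.length hcontra
    simp at this
  · obtain ⟨k, hk⟩ := Option.isSome_iff_exists.mp ((PySem.List.index?_isSome_iff _ _).mpr m3)
    obtain ⟨pre, suf, hfs, hklen, hpre⟩ := (PySem.List.index?_eq_some_iff _ _ _).mp hk
    have hk' : List.idxOf? pvT3 formals = some k := by rw [← PySem.List.index?_eq_idxOf?]; exact hk
    rw [hk] at h
    have hsuf : suf.length = 2 := by subst hfs; simp at h; omega
    obtain ⟨s1, s2, rfl⟩ : ∃ s1 s2, suf = [s1, s2] := by
      match suf, hsuf with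
      | [s1, s2], _ => exact ⟨s1, s2, rfl⟩
    subst hfs; subst hklen
    have hA : collapseFormalsTO (pre ++ [pvT3, s1, s2]) = pre := by
      rw [show collapseFormalsTO (pre ++ [pvT3, s1, s2]) =
          pvPopFour (PySem.List.insert (pre ++ [pvT3, s1, s2])
            (((pre.length : Nat) : Int) + 4) pvR3) ((pre.length : Nat) : Int) by
        simp [collapseFormalsTO, m1, m2, m3, hk']]
      exact pv_computeA_clamp pre pvT3 s1 s2 pvR3
    have hB : collapseFormalsTO_alt (pre ++ [pvT3, s1, s2]) = pre ++ [pvR3] := by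
      rw [show collapseFormalsTO_alt (pre ++ [pvT3, s1, s2]) =
          PySem.List.slice (pre ++ [pvT3, s1, s2]) none (some ((pre.length : Nat) : Int)) ++ [pvR3] ++
            PySem.List.slice (pre ++ [pvT3, s1, s2]) (some (((pre.length : Nat) : Int) + 4)) none by
        simp [collapseFormalsTO_alt, pvScanRules, pvRules, m1, m2, m3, hk']]
      exact pv_computeB_clamp pre pvT3 s1 s2 pvR3
    rw [hA, hB]
    intro hcontra
    have := congrArg List.length hcontra
    simp at this


-- ===== VERDICT (by name: the statement is the Claim_ definition above) =====
theorem collapseFormalsTO_changed : Claim_changed_collapseFormalsTO := by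
  unfold Claim_changed_collapseFormalsTO; decide
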